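-- pv_equiv track=rewrite | github.com/samtoneill/tapnx | test_scripts/shortest_path_tree.py | divergence_node
-- ===== SOURCE A (Python) =====
-- def divergence_node(shortest_path, longest_path):
--
--     divergence_node = None
--     # reverse the shortest list
--     nodes = shortest_path[::-1]
--     # scan the nodes in reverse order, exclude last node
--     for u in shortest_path[::-1][1:]:
--         if u in longest_path:
--             divergence_node = u
--             break
--
--     return divergence_node
-- ===== SOURCE B (Python) =====
-- def divergence_node(shortest_path, longest_path):
--     # Forward scan with a keep-last accumulator instead of A's reversed scan with break;
--     # membership is against a precomputed set of longest_path.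
--     members = set(longest_path)
--     result = None
--     for u in shortest_path[:-1]:
--         if u in members:
--             result = u
--     return result
-- ===== Notes on version B (the rewrite author's own statement) =====
-- stated objective: alternative
-- what changed: Replaces A's double list reversal and break-on-first-match backward scan by a single forward pass over shortest_path[:-1] that keeps the last matching node in an accumulator, with membership tested against a precomputed set instead of the raw list; trades A's early break for a scan-free membership test.
import Mathlib
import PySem

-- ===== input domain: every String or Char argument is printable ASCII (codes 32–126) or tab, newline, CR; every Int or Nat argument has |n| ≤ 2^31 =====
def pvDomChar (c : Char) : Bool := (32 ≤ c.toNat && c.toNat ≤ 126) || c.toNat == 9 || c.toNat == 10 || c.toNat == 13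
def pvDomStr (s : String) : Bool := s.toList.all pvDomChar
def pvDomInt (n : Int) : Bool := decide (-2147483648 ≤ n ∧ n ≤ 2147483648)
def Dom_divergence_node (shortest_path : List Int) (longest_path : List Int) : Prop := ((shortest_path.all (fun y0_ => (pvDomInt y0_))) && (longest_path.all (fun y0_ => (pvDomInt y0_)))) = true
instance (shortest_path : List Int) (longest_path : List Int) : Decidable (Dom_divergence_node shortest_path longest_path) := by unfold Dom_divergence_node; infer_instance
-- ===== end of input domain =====

-- B replaces A's reversed scan with early break by a forward pass keeping the last
-- node found in a precomputed membership set (alternative decomposition; return value identical).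


-- ===== PORT A =====
-- loop 'for u in …: if u in longest_path: divergence_node = u; break' → first-match recursion
def divergence_node_loopA (longest_path : List Int) : List Int → Option Int
  | [] => none
  | u :: rest => if u ∈ longest_path then some u else divergence_node_loopA longest_path rest

def divergence_node (shortest_path : List Int) (longest_path : List Int) : Option Int :=
  -- nodes = shortest_path[::-1]
  let _nodes := (PySem.List.slice? shortest_path none none (-1)).getD []
  -- for u in shortest_path[::-1][1:]: …
  divergence_node_loopA longest_path
    (PySem.List.slice ((PySem.List.slice? shortest_path none none (-1)).getD []) (some 1) none)

-- ===== PORT B =====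
def divergence_node_alt (shortest_path : List Int) (longest_path : List Int) : Option Int :=
  let members : PySem.Set Int := PySem.Set.ofList longest_path
  (PySem.List.slice shortest_path none (some (-1))).foldl
    (fun result u => if PySem.Set.contains members u then some u else result) none

-- ===== PRECONDITION & SPEC =====
def Spec_divergence_node (shortest_path : List Int) (longest_path : List Int) (out : Option Int) : Prop := out = divergence_node_alt shortest_path longest_path
instance (shortest_path : List Int) (longest_path : List Int) (out : Option Int) : Decidable (Spec_divergence_node shortest_path longest_path out) := by unfold Spec_divergence_node; infer_instance

-- ===== CLAIM (what is proved, stated in full; the proofs are below) =====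
def Claim_equal_divergence_node : Prop := ∀ (shortest_path : List Int) (longest_path : List Int), Dom_divergence_node shortest_path longest_path → Spec_divergence_node shortest_path longest_path (divergence_node shortest_path longest_path)

-- ===== LEMMAS AND PROOFS =====

theorem loopA_reverse_eq_foldl (lp : List Int) (l : List Int) :
    divergence_node_loopA lp l.reverse =
      l.foldl (fun result u => if PySem.Set.contains (PySem.Set.ofList lp) u then some u else result) none := by
  induction l using List.reverseRecOn with
  | nil => rfl
  | append_singleton l' a ih =>
      rw [List.reverse_append]
      simp only [List.reverse_singleton, List.singleton_append, divergence_node_loopA,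
        List.foldl_append, List.foldl_cons, List.foldl_nil, ih]
      by_cases h : a ∈ lp <;> simp [h]

-- ===== VERDICT =====
theorem divergence_node_spec : Claim_equal_divergence_node := by
  intro sp lp _
  unfold Spec_divergence_node divergence_node divergence_node_alt
  rw [PySem.List.slice?_none_none_neg_one, PySem.List.slice_to_neg_one]
  have h1 : PySem.List.slice sp.reverse (some 1) none = sp.dropLast.reverse := by
    rw [PySem.List.slice_from_one, ← List.drop_one, List.drop_reverse,
      List.dropLast_eq_take]
  simp only [Option.getD_some, h1, loopA_reverse_eq_foldl]
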